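-- pv_equiv track=rewrite | github.com/Yeddo/python | anagram_builder.py | removeSingles
-- ===== SOURCE A (Python) =====
-- def removeSingles(anagramsDict):
--     '''
--     Removes single element lists from a dicitonary of lists
--     '''
--     singletons = []
--     for key,value in anagramsDict.items():
--         if len(value) < 2:
--             singletons.append(key)
--     for key in singletons:
--         del anagramsDict[key]
--     return anagramsDict
-- ===== SOURCE B (Python) =====
-- def removeSingles(anagramsDict):
--     '''
--     Removes single element lists from a dicitonary of lists
--     '''
--     # Rotation in place: pop the front entry len(d) times, re-appending each
--     # survivor (len >= 2) at the back; survivors end up in their original order.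
--     for _ in range(len(anagramsDict)):
--         key = next(iter(anagramsDict))
--         value = anagramsDict.pop(key)
--         if len(value) >= 2:
--             anagramsDict[key] = value
--     return anagramsDict
-- ===== Notes on version B (the rewrite author's own statement) =====
-- stated objective: alternative
-- what changed: Replaces A's two staged passes (collect singleton keys into a list, then delete them) by a single in-place rotation: pop the front entry len(d) times and re-append each survivor at the back, so no auxiliary key list is built.
import Mathlib
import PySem

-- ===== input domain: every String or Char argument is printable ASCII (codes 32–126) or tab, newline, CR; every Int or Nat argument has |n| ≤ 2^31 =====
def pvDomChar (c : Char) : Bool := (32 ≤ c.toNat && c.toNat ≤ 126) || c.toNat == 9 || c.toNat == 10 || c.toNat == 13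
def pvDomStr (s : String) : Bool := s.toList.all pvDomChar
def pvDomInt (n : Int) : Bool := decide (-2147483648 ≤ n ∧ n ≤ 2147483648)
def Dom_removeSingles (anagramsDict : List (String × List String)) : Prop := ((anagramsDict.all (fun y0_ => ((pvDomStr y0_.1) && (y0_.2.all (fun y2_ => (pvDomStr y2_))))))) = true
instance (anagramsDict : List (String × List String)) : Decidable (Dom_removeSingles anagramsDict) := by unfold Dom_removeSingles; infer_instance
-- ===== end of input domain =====

-- B replaces A's collect-singleton-keys-then-delete two-pass structure by a single in-place
-- rotation (pop the front entry n times, re-append survivors at the back); return value proved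
-- equal; both Pythons mutate the argument dict in place to the same final contents.

-- ===== PORT A =====
-- 'del m[key]' on a dict with unique keys removes exactly the (first) pair with that key:
-- exact via eraseP on the association list inside Pre_ (keys Nodup).
def removeSingles (anagramsDict : List (String × List String)) : List (String × List String) :=
  let singletons := anagramsDict.foldl
    (fun acc kv => if kv.2.length < 2 then acc ++ [kv.1] else acc) ([] : List String)
  singletons.foldl (fun m k => m.eraseP (fun kv => kv.1 == k)) anagramsDict

-- ===== PORT B =====
-- One loop-body step of B: key = next(iter(d)) (the first key; the [] case is next() raising
-- StopIteration, unreachable since the dict stays nonempty through the n iterations);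
-- value = d.pop(key) (removes the first pair with that key); then 'd[key] = value' overwrites
-- in place if the key is still present, else appends (exact dict-assignment semantics).
def stepB (m : List (String × List String)) : List (String × List String) :=
  match m with
  | [] => []
  | (k, v) :: _ =>
    let m' := m.eraseP (fun p => p.1 == k)
    if 2 ≤ v.length then
      (if m'.any (fun p => p.1 == k) then m'.map (fun p => if p.1 == k then (k, v) else p)
       else m' ++ [(k, v)])
    else m'

def removeSingles_alt (anagramsDict : List (String × List String)) : List (String × List String) :=
  (List.range anagramsDict.length).foldl (fun m _ => stepB m) anagramsDict

-- ===== PRECONDITION & SPEC =====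
-- Pre_ excludes association lists with duplicate keys: those represent no Python dict
-- (a dict cannot hold duplicate keys), so any port behaviour there is a representation artefact.
def Pre_removeSingles (anagramsDict : List (String × List String)) : Prop :=
  (anagramsDict.map Prod.fst).Nodup
instance (anagramsDict : List (String × List String)) : Decidable (Pre_removeSingles anagramsDict) := by
  unfold Pre_removeSingles; infer_instance
def pvWitness_removeSingles : (List (String × List String)) :=
  [("ab", ["ab", "ba"]), ("c", ["c"])]
def Spec_removeSingles (anagramsDict : List (String × List String)) (out : List (String × List String)) : Prop := out = removeSingles_alt anagramsDict
instance (anagramsDict : List (String × List String)) (out : List (String × List String)) : Decidable (Spec_removeSingles anagramsDict out) := by unfold Spec_removeSingles; infer_instance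

-- ===== CLAIM (what is proved, stated in full; the proofs are below) =====
def Claim_equal_removeSingles : Prop := ∀ (anagramsDict : List (String × List String)), Dom_removeSingles anagramsDict → Pre_removeSingles anagramsDict → Spec_removeSingles anagramsDict (removeSingles anagramsDict)

-- ===== LEMMAS AND PROOFS =====

-- A's first loop collects exactly the keys of the singleton entries, in order.
lemma singles_foldl (d : List (String × List String)) (acc : List String) :
    d.foldl (fun acc kv => if kv.2.length < 2 then acc ++ [kv.1] else acc) acc
      = acc ++ (d.filter (fun kv => kv.2.length < 2)).map Prod.fst := by
  induction d generalizing acc with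
  | nil => simp
  | cons kv d ih =>
    rw [List.foldl_cons, List.filter_cons]
    by_cases h : kv.2.length < 2
    · rw [if_pos h, if_pos (decide_eq_true h), ih, List.map_cons, List.append_assoc,
        List.singleton_append]
    · rw [if_neg h, if_neg (by simpa using h), ih]

-- Erasing keys that all differ from the head's key leaves the head in place.
lemma foldl_erase_cons (kv : String × List String) (d : List (String × List String))
    (ks : List String) (h : ∀ k ∈ ks, k ≠ kv.1) :
    ks.foldl (fun m k => m.eraseP (fun p => p.1 == k)) (kv :: d)
      = kv :: ks.foldl (fun m k => m.eraseP (fun p => p.1 == k)) d := by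
  induction ks generalizing d with
  | nil => rfl
  | cons k ks ih =>
    have hk : kv.1 ≠ k := fun e => h k (by simp) e.symm
    simp only [List.foldl_cons, List.eraseP_cons]
    rw [show (kv.1 == k) = false from beq_eq_false_iff_ne.mpr hk, cond_false]
    exact ih _ (fun k hk' => h k (by simp [hk']))

-- Deleting every singleton key from a nodup-keyed association list is filtering the survivors.
lemma erase_singles (d : List (String × List String)) (hnd : (d.map Prod.fst).Nodup) :
    ((d.filter (fun kv => kv.2.length < 2)).map Prod.fst).foldl
        (fun m k => m.eraseP (fun kv => kv.1 == k)) d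
      = d.filter (fun kv => 2 ≤ kv.2.length) := by
  induction d with
  | nil => rfl
  | cons kv d ih =>
    simp only [List.map_cons, List.nodup_cons] at hnd
    obtain ⟨hnotin, hnd⟩ := hnd
    have hsub : ∀ k ∈ (d.filter (fun kv => kv.2.length < 2)).map Prod.fst, k ≠ kv.1 := by
      intro k hk e
      subst e
      obtain ⟨p, hp, hpk⟩ := List.mem_map.mp hk
      exact hnotin (hpk ▸ List.mem_map_of_mem (List.mem_of_mem_filter hp))
    by_cases h : kv.2.length < 2
    · conv_lhs => rw [List.filter_cons, if_pos (decide_eq_true h)]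
      rw [List.map_cons, List.foldl_cons]
      simp only [List.eraseP_cons]
      rw [show (kv.1 == kv.1) = true from beq_self_eq_true kv.1, cond_true, ih hnd,
        List.filter_cons, if_neg (by simp; omega)]
    · conv_lhs => rw [List.filter_cons, if_neg (by simpa using h)]
      rw [foldl_erase_cons kv d _ hsub, ih hnd, List.filter_cons,
        if_pos (by simp; omega)]

-- A fold over range with an index-blind body is function iteration.
lemma foldl_range_const {α : Type} (f : α → α) (x : α) (n : Nat) :
    (List.range n).foldl (fun m _ => f m) x = f^[n] x := by
  induction n generalizing x with
  | zero => rfl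
  | succ n ih =>
    rw [List.range_succ, List.foldl_append, ih, List.foldl_cons, List.foldl_nil,
      Function.iterate_succ_apply']

-- One rotation step on a nonempty list with unique keys: drop the head, append it back iff
-- it survives (the head's key occurs nowhere in the tail, so pop takes the head and the
-- re-assignment appends).
lemma stepB_cons (k : String) (v : List String) (t : List (String × List String))
    (hk : k ∉ t.map Prod.fst) :
    stepB ((k, v) :: t) = if 2 ≤ v.length then t ++ [(k, v)] else t := by
  have herase : ((k, v) :: t).eraseP (fun p => p.1 == k) = t :=
    List.eraseP_cons_of_pos (by simp)
  have hany : t.any (fun p => p.1 == k) = false := by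
    rw [List.any_eq_false]
    intro p hp
    simp only [beq_iff_eq]
    exact fun e => hk (List.mem_map.mpr ⟨p, hp, e⟩)
  unfold stepB
  simp only [herase, hany, Bool.false_eq_true, if_false]

-- Rotating (front entries of xs popped, survivors appended) through all of xs.
lemma rotate_filter (xs ys : List (String × List String))
    (h : ((xs ++ ys).map Prod.fst).Nodup) :
    stepB^[xs.length] (xs ++ ys) = ys ++ xs.filter (fun kv => 2 ≤ kv.2.length) := by
  induction xs generalizing ys with
  | nil => simp
  | cons kv xs ih =>
    obtain ⟨k, v⟩ := kv
    have h' : (k :: (xs ++ ys).map Prod.fst).Nodup := by simpa using h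
    obtain ⟨hk, hnd⟩ := List.nodup_cons.mp h'
    have hstep : stepB ((k, v) :: (xs ++ ys))
        = if 2 ≤ v.length then (xs ++ ys) ++ [(k, v)] else xs ++ ys :=
      stepB_cons k v (xs ++ ys) hk
    rw [List.length_cons, Function.iterate_succ_apply, List.cons_append, hstep]
    by_cases hv : 2 ≤ v.length
    · rw [if_pos hv, List.append_assoc]
      have hperm : ((xs ++ (ys ++ [(k, v)])).map Prod.fst).Perm
          (((k, v) :: (xs ++ ys)).map Prod.fst) := by
        refine List.Perm.map _ ?_
        rw [← List.append_assoc]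
        exact List.perm_append_singleton _ _
      have hnd' : ((xs ++ (ys ++ [(k, v)])).map Prod.fst).Nodup :=
        hperm.symm.nodup (by rw [List.map_cons]; exact h')
      rw [ih (ys ++ [(k, v)]) hnd', List.filter_cons, if_pos (by simpa using hv),
        List.append_assoc, List.singleton_append]
    · rw [if_neg hv, ih ys hnd, List.filter_cons, if_neg (by simpa using hv)]

-- ===== VERDICT (by name: the statement is the Claim_ definition above) =====
theorem removeSingles_spec : Claim_equal_removeSingles := by
  intro d _ hpre
  unfold Spec_removeSingles removeSingles removeSingles_alt
  have hB : (List.range d.length).foldl (fun m _ => stepB m) d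
      = d.filter (fun kv => 2 ≤ kv.2.length) := by
    rw [foldl_range_const]
    simpa using rotate_filter d [] (by simpa using hpre)
  rw [hB]
  simp only [singles_foldl, List.nil_append]
  exact erase_singles d hpre
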